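-- pv_equiv track=rewrite | github.com/Dhater/Sistemas2 | prueba/count_answers.py | analyze_mapping
-- ===== SOURCE A (Python) =====
-- from typing import Tuple, List, Union
--
-- def analyze_mapping(data: dict) -> Tuple[int,int,List[str]]:
--     """
--     data expected like { "1": { ... }, "2": { ... }, ... }
--     """
--     total = 0
--     answered = 0
--     empty_ids = []
--     for key, item in data.items():
--         if not isinstance(item, dict):
--             continue
--         total += 1
--         llm = item.get("llm_answer", None)
--         if llm is not None and str(llm).strip() != "":
--             answered += 1
--         else:
--             empty_ids.append(str(key))
--     return total, answered, empty_ids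
-- ===== SOURCE B (Python) =====
-- def analyze_mapping(data):
--     empty_ids = [
--         str(key)
--         for key, item in data.items()
--         if isinstance(item, dict)
--         and (item.get("llm_answer", None) is None
--              or str(item.get("llm_answer", None)).strip() == "")
--     ]
--     total = sum(1 for item in data.values() if isinstance(item, dict))
--     return total, total - len(empty_ids), empty_ids
-- ===== Notes on version B (the rewrite author's own statement) =====
-- stated objective: simpler
-- what changed: Replaces the three-accumulator loop by a single comprehension collecting the empty ids plus a count of dict items, deriving answered arithmetically as total - len(empty_ids).
import Mathlib
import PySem

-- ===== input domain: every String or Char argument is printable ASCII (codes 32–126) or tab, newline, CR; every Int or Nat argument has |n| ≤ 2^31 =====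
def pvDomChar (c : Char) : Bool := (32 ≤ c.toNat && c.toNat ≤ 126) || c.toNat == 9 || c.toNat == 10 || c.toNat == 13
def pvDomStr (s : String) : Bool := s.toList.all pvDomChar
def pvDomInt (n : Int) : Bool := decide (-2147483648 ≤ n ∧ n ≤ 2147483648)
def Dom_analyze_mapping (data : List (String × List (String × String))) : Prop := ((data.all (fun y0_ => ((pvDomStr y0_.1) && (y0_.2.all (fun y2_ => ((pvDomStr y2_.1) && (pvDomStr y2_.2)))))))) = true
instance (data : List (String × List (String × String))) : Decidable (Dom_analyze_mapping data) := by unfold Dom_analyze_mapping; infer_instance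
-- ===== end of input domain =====

-- B replaces A's three-accumulator loop by one filter pass collecting the empty ids plus a
-- count of the entries, deriving answered arithmetically as total - len(empty_ids) (simpler).


-- ===== PORT A =====
-- for key, item in data.items(): every item is a dict here (the type says so), so the
-- isinstance guard is always true; item.get("llm_answer", None) is a first-match lookup.
def analyze_mapping (data : List (String × List (String × String))) : Int × Int × List String :=
  data.foldl (fun (st : Int × Int × List String) kv =>
    let llm := (PySem.Dict.mk kv.2).get? "llm_answer"
    match llm with
    | some v =>
        if PySem.Str.strip v ≠ "" then (st.1 + 1, st.2.1 + 1, st.2.2)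
        else (st.1 + 1, st.2.1, st.2.2 ++ [kv.1])
    | none => (st.1 + 1, st.2.1, st.2.2 ++ [kv.1])) ((0 : Int), (0 : Int), ([] : List String))

-- ===== PORT B =====
def analyze_mapping_alt (data : List (String × List (String × String))) : Int × Int × List String :=
  let empty_ids := (data.filter (fun kv =>
      match (PySem.Dict.mk kv.2).get? "llm_answer" with
      | none => true
      | some v => PySem.Str.strip v == "")).map (·.1)
  let total : Int := (data.map (fun _ => (1 : Int))).sum
  (total, total - empty_ids.length, empty_ids)

-- ===== PRECONDITION & SPEC =====
def Spec_analyze_mapping (data : List (String × List (String × String))) (out : Int × Int × List String) : Prop := out = analyze_mapping_alt data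
instance (data : List (String × List (String × String))) (out : Int × Int × List String) : Decidable (Spec_analyze_mapping data out) := by unfold Spec_analyze_mapping; infer_instance

-- ===== CLAIM (what is proved, stated in full; the proofs are below) =====
def Claim_equal_analyze_mapping : Prop := ∀ (data : List (String × List (String × String))), Dom_analyze_mapping data → Spec_analyze_mapping data (analyze_mapping data)

-- ===== LEMMAS AND PROOFS =====

-- the 'empty answer' test both programs apply to one entry
def pvEmpty (kv : String × List (String × String)) : Bool :=
  match (PySem.Dict.mk kv.2).get? "llm_answer" with
  | none => true
  | some v => PySem.Str.strip v == ""

-- A's loop, started from any accumulator, adds the length to total, the non-empty count to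
-- answered, and appends the keys of the empty entries.
lemma foldA (data : List (String × List (String × String))) (t a : Int) (ids : List String) :
    data.foldl (fun (st : Int × Int × List String) kv =>
      let llm := (PySem.Dict.mk kv.2).get? "llm_answer"
      match llm with
      | some v =>
          if PySem.Str.strip v ≠ "" then (st.1 + 1, st.2.1 + 1, st.2.2)
          else (st.1 + 1, st.2.1, st.2.2 ++ [kv.1])
      | none => (st.1 + 1, st.2.1, st.2.2 ++ [kv.1])) (t, a, ids)
    = (t + data.length, a + ((data.filter (fun kv => !pvEmpty kv)).length : Int),
       ids ++ (data.filter pvEmpty).map (·.1)) := by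
  induction data generalizing t a ids with
  | nil => simp
  | cons kv rest ih =>
    by_cases h : pvEmpty kv = true
    · have hstep : (match (PySem.Dict.mk kv.2).get? "llm_answer" with
        | some v =>
            if PySem.Str.strip v ≠ "" then (t + 1, a + 1, ids)
            else (t + 1, a, ids ++ [kv.1])
        | none => (t + 1, a, ids ++ [kv.1])) = (t + 1, a, ids ++ [kv.1]) := by
        unfold pvEmpty at h
        rcases hg : (PySem.Dict.mk kv.2).get? "llm_answer" with _ | v
        · simp
        · simp [hg] at h ⊢
          simp [h]
      simp only [List.foldl_cons, hstep, ih, List.filter_cons, h]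
      simp
      push_cast; ring
    · have h' : pvEmpty kv = false := by simpa using h
      have hstep : (match (PySem.Dict.mk kv.2).get? "llm_answer" with
        | some v =>
            if PySem.Str.strip v ≠ "" then (t + 1, a + 1, ids)
            else (t + 1, a, ids ++ [kv.1])
        | none => (t + 1, a, ids ++ [kv.1])) = (t + 1, a + 1, ids) := by
        unfold pvEmpty at h'
        rcases hg : (PySem.Dict.mk kv.2).get? "llm_answer" with _ | v
        · simp [hg] at h'
        · simp [hg] at h' ⊢
          simp [h']
      simp only [List.foldl_cons, hstep, ih, List.filter_cons, h']
      simp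
      constructor
      · push_cast; ring
      · push_cast; ring

-- ===== VERDICT (by name: the statement is the Claim_ definition above) =====
theorem analyze_mapping_spec : Claim_equal_analyze_mapping := by
  intro data _
  show analyze_mapping data = analyze_mapping_alt data
  unfold analyze_mapping analyze_mapping_alt
  rw [foldA]
  rw [show (fun kv : String × List (String × String) =>
      match (PySem.Dict.mk kv.2).get? "llm_answer" with
      | none => true
      | some v => PySem.Str.strip v == "") = pvEmpty from rfl]
  have hlen := List.length_eq_length_filter_add (l := data) pvEmpty
  have htotal : ((data.map (fun _ => (1 : Int))).sum) = (data.length : Int) := by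
    induction data with
    | nil => simp
    | cons x xs ih => simp [ih]; ring
  refine Prod.ext ?_ (Prod.ext ?_ rfl)
  · simp [htotal]
  · simp only [htotal, List.length_map]
    omega
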